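-- pv_equiv track=rewrite | github.com/dheerosaur/leetcode-practice | python/1033.move_stones.py | numMovesStones
-- ===== SOURCE A (Python) =====
-- from typing import List
--
-- def numMovesStones(a:int, b:int, c:int) -> List[int]:
--     a, b, c = sorted([a, b, c])
--     minimum = 0
--     maximum = 0
--     for i in range(a + 1, c):
--         if i == b:
--             continue
--         maximum += 1
--     d1 = b - a
--     d2 = c - b
--     if d1 == 2 or d2 == 2:
--         minimum = 1
--     elif d1 > 1 and d2 > 1:
--         minimum  = 2
--     elif d1 > 1 or d2 > 1:
--         minimum = 1
--     return [minimum, maximum]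
-- ===== SOURCE B (Python) =====
-- def numMovesStones(a, b, c):
--     lo = min(a, b, c)
--     hi = max(a, b, c)
--     mid = a + b + c - lo - hi
--     maximum = 0 if lo == hi else hi - lo - 1 - (1 if lo < mid < hi else 0)
--     if mid - lo <= 1 and hi - mid <= 1:
--         minimum = 0
--     elif mid - lo > 2 and hi - mid > 2:
--         minimum = 2
--     else:
--         minimum = 1
--     return [minimum, maximum]
-- ===== Notes on version B (the rewrite author's own statement) =====
-- stated objective: faster
-- what changed: B replaces A's element-by-element counting loop over range(a+1, c) (and the sorted() call) by closed-form arithmetic: min/max/mid of the three stones and a direct formula hi-lo-1 minus 1 when the middle stone lies strictly between, plus a collapsed three-case minimum.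
import Mathlib
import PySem

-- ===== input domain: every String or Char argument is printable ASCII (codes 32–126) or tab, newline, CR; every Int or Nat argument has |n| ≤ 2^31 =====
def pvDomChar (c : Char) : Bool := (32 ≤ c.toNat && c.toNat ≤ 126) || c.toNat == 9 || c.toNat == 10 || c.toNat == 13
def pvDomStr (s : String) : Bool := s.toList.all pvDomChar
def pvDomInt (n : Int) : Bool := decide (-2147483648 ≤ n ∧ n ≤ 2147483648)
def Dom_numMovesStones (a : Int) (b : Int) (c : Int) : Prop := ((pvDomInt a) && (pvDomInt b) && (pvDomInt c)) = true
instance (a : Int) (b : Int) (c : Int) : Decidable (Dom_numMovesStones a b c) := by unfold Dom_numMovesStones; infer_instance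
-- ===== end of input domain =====

-- B replaces A's O(c-a) counting loop by a closed-form computation of both answers (faster, asymptotic).

-- ===== PORT A =====
def numMovesStones (a : Int) (b : Int) (c : Int) : List Int :=
  -- a, b, c = sorted([a, b, c]); sorted of a 3-list always has 3 elements, so the catch-all is unreachable
  match PySem.List.sorted [a, b, c] (fun v => v) false with
  | [a, b, c] =>
    let minimum : Int := 0
    let maximum : Int :=
      (PySem.List.pyRange (a + 1) c 1).foldl (fun m i => if i = b then m else m + 1) 0
    let d1 := b - a
    let d2 := c - b
    let minimum : Int :=
      if d1 = 2 ∨ d2 = 2 then 1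
      else if d1 > 1 ∧ d2 > 1 then 2
      else if d1 > 1 ∨ d2 > 1 then 1
      else minimum
    [minimum, maximum]
  | _ => []

-- ===== PORT B =====
def numMovesStones_alt (a : Int) (b : Int) (c : Int) : List Int :=
  let lo := min a (min b c)
  let hi := max a (max b c)
  let mid := a + b + c - lo - hi
  let maximum : Int := if lo = hi then 0 else hi - lo - 1 - (if lo < mid ∧ mid < hi then 1 else 0)
  let minimum : Int :=
    if mid - lo ≤ 1 ∧ hi - mid ≤ 1 then 0
    else if mid - lo > 2 ∧ hi - mid > 2 then 2
    else 1
  [minimum, maximum]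

-- ===== PRECONDITION & SPEC =====
def Spec_numMovesStones (a : Int) (b : Int) (c : Int) (out : List Int) : Prop := out = numMovesStones_alt a b c
instance (a : Int) (b : Int) (c : Int) (out : List Int) : Decidable (Spec_numMovesStones a b c out) := by unfold Spec_numMovesStones; infer_instance

-- ===== CLAIM (what is proved, stated in full; the proofs are below) =====
def Claim_equal_numMovesStones : Prop := ∀ (a : Int) (b : Int) (c : Int), Dom_numMovesStones a b c → Spec_numMovesStones a b c (numMovesStones a b c)

-- ===== LEMMAS AND PROOFS =====

/-- `sorted([a,b,c])` is the ordered triple: it lists min, middle, max of the three inputs. -/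
theorem pv_sorted3 (a b c : Int) : ∃ x y z, PySem.List.sorted [a, b, c] (fun v => v) false = [x, y, z]
    ∧ x ≤ y ∧ y ≤ z ∧ x = min a (min b c) ∧ z = max a (max b c) ∧ x + y + z = a + b + c := by
  rcases le_total a b with h1 | h1 <;> rcases le_total b c with h2 | h2 <;> rcases le_total a c with h3 | h3
  · exact ⟨a, b, c, PySem.List.sorted_id_eq_of_perm_of_pairwise _ _ (List.Perm.refl _)
      (by simp [List.pairwise_cons]; omega), by omega, by omega, by omega, by omega, by omega⟩
  · exact ⟨a, b, c, PySem.List.sorted_id_eq_of_perm_of_pairwise _ _ (List.Perm.refl _)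
      (by simp [List.pairwise_cons]; omega), by omega, by omega, by omega, by omega, by omega⟩
  · exact ⟨a, c, b, PySem.List.sorted_id_eq_of_perm_of_pairwise _ _
      (List.Perm.cons a (List.Perm.swap b c []))
      (by simp [List.pairwise_cons]; omega), by omega, by omega, by omega, by omega, by omega⟩
  · exact ⟨c, a, b, PySem.List.sorted_id_eq_of_perm_of_pairwise _ _
      ((List.Perm.swap a c [b]).trans (List.Perm.cons a (List.Perm.swap b c [])))
      (by simp [List.pairwise_cons]; omega), by omega, by omega, by omega, by omega, by omega⟩
  · exact ⟨b, a, c, PySem.List.sorted_id_eq_of_perm_of_pairwise _ _ (List.Perm.swap a b [c])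
      (by simp [List.pairwise_cons]; omega), by omega, by omega, by omega, by omega, by omega⟩
  · exact ⟨b, c, a, PySem.List.sorted_id_eq_of_perm_of_pairwise _ _
      ((List.Perm.cons b (List.Perm.swap a c [])).trans (List.Perm.swap a b [c]))
      (by simp [List.pairwise_cons]; omega), by omega, by omega, by omega, by omega, by omega⟩
  · exact ⟨b, c, a, PySem.List.sorted_id_eq_of_perm_of_pairwise _ _
      ((List.Perm.cons b (List.Perm.swap a c [])).trans (List.Perm.swap a b [c]))
      (by simp [List.pairwise_cons]; omega), by omega, by omega, by omega, by omega, by omega⟩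
  · exact ⟨c, b, a, PySem.List.sorted_id_eq_of_perm_of_pairwise _ _
      (((List.Perm.swap b c [a]).trans (List.Perm.cons b (List.Perm.swap a c []))).trans (List.Perm.swap a b [c]))
      (by simp [List.pairwise_cons]; omega), by omega, by omega, by omega, by omega, by omega⟩

/-- A's skip-`y` counting loop is the count of elements ≠ y. -/
theorem pv_foldl_skip (y : Int) (l : List Int) (n : Int) :
    l.foldl (fun m i => if i = y then m else m + 1) n
      = n + (l.countP (fun i => decide (i ≠ y)) : Int) := by
  induction l generalizing n with
  | nil => simp
  | cons h t ih =>
    simp [List.countP_cons]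
    split_ifs <;> simp [ih] <;> omega

/-- Closed form of the count of elements ≠ y in range(x+1, z). -/
theorem pv_countP_range (x z y : Int) :
    ((PySem.List.pyRange (x+1) z 1).countP (fun i => decide (i ≠ y)) : Int)
      = max (z - x - 1) 0 - (if x < y ∧ y < z then 1 else 0) := by
  have hlen := PySem.List.length_pyRange_one (a := x+1) (b := z)
  have hnd := PySem.List.nodup_pyRange_one (a := x+1) (b := z)
  have hmem := PySem.List.mem_pyRange_one (a := x+1) (b := z) (x := y)
  have h1 : ((PySem.List.pyRange (x+1) z 1).length)
      = (PySem.List.pyRange (x+1) z 1).countP (fun i => decide (i ≠ y))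
        + (PySem.List.pyRange (x+1) z 1).count y := by
    rw [List.length_eq_countP_add_countP (p := fun i => decide (i ≠ y))]
    congr 1
    rw [List.count]
    apply List.countP_congr
    intro i _
    simp
  by_cases h : x < y ∧ y < z
  · have hc : (PySem.List.pyRange (x+1) z 1).count y = 1 :=
      List.count_eq_one_of_mem hnd (hmem.mpr ⟨by omega, h.2⟩)
    rw [if_pos h]
    rw [hc] at h1
    omega
  · have hc : (PySem.List.pyRange (x+1) z 1).count y = 0 := by
      rw [List.count_eq_zero_of_not_mem]
      intro hm
      have := hmem.mp hm
      omega
    rw [if_neg h]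
    rw [hc] at h1
    omega

-- ===== VERDICT (by name: the statement is the Claim_ definition above) =====
theorem numMovesStones_spec : Claim_equal_numMovesStones := by
  intro a b c _
  unfold Spec_numMovesStones
  obtain ⟨x, y, z, hs, hxy, hyz, hmin, hmax, hsum⟩ := pv_sorted3 a b c
  unfold numMovesStones numMovesStones_alt
  rw [hs]
  simp only [pv_foldl_skip, pv_countP_range, zero_add, List.cons.injEq, and_true]
  constructor <;> split_ifs <;> omega
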